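-- pv_equiv track=rewrite | github.com/HumanChwan/CookieBot | CookieMain.py | stringToInfixList
-- ===== SOURCE A (Python) =====
-- def stringToInfixList(inf):
--     cache = ''
--     FinalInfixList = []
--     for c in inf:
--         if c == ' ' and cache != '':
--             FinalInfixList.append(cache)
--             cache = ''
--         elif '0' <= c <= '9' or c == '.':
--             cache += c
--         elif c in {'+', '-', '*', '/', '^', '(', ')'}:
--             if cache != '':
--                 FinalInfixList.append(cache)
--                 cache = ''
--             FinalInfixList.append(c)
--     if cache != '':
--         FinalInfixList.append(cache)
--         cache = ''
--     return FinalInfixList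
-- ===== SOURCE B (Python) =====
-- def stringToInfixList(inf):
--     # Two-phase: drop unrecognized characters, then greedily group number tokens.
--     ops = '+-*/^()'
--     cleaned = [c for c in inf if c == ' ' or c == '.' or '0' <= c <= '9' or c in ops]
--     out = []
--     i = 0
--     n = len(cleaned)
--     while i < n:
--         c = cleaned[i]
--         if c == ' ':
--             i += 1
--         elif c in ops:
--             out.append(c)
--             i += 1
--         else:
--             j = i
--             while j < n and (cleaned[j] == '.' or '0' <= cleaned[j] <= '9'):
--                 j += 1
--             out.append(''.join(cleaned[i:j]))
--             i = j
--     return out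
-- ===== Notes on version B (the rewrite author's own statement) =====
-- stated objective: idiomatic
-- what changed: Replaces A's single-pass character loop with mutable cache state by a two-phase tokenizer: first filter the string to the recognized alphabet, then greedily group maximal digit/dot runs and emit operators, with spaces as separators.
import Mathlib
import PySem

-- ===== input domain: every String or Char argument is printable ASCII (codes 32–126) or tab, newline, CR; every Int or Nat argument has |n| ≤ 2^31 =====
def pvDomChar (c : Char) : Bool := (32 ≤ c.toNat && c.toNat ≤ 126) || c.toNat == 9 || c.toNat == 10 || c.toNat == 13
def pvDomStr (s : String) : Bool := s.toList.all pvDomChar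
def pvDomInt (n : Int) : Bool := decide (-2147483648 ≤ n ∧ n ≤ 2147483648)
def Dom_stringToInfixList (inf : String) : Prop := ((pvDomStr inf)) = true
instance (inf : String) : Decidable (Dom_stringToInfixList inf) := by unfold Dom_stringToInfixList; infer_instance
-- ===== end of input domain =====

-- B tokenizes in two phases (filter to the recognized alphabet, then greedy grouping)
-- instead of A's single pass with a pending-number cache; same result, same cost.

-- ===== PORT A =====
-- A's branch tests, named: '0' <= c <= '9' or c == '.'  /  c in {'+','-','*','/','^','(',')'}
def pvIsNumA (c : Char) : Bool := ('0' ≤ c && c ≤ '9') || c == '.'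
def pvIsOpA (c : Char) : Bool :=
  c == '+' || c == '-' || c == '*' || c == '/' || c == '^' || c == '(' || c == ')'

-- one iteration of A's for-loop; state = (FinalInfixList, cache)
def pvStepA (st : List String × List Char) (c : Char) : List String × List Char :=
  if c = ' ' ∧ st.2 ≠ [] then (st.1 ++ [String.mk st.2], [])
  else if pvIsNumA c then (st.1, st.2 ++ [c])
  else if pvIsOpA c then
    ((if st.2 ≠ [] then st.1 ++ [String.mk st.2] else st.1) ++ [String.mk [c]], [])
  else st

-- the final 'if cache != '': append cache'
def pvFlushA (st : List String × List Char) : List String :=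
  if st.2 ≠ [] then st.1 ++ [String.mk st.2] else st.1

def stringToInfixList (inf : String) : List String :=
  pvFlushA (inf.toList.foldl pvStepA ([], []))

-- ===== PORT B =====
def pvIsNumB (c : Char) : Bool := c == '.' || ('0' ≤ c && c ≤ '9')
def pvIsOpB (c : Char) : Bool :=
  c == '+' || c == '-' || c == '*' || c == '/' || c == '^' || c == '(' || c == ')'
def pvKeepB (c : Char) : Bool := c == ' ' || pvIsNumB c || pvIsOpB c

-- the while-loop over the cleaned characters: skip spaces, emit operators,
-- otherwise take the maximal run of digit/dot characters as one token
def pvTokB : List Char → List String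
  | [] => []
  | c :: rest =>
    if c = ' ' then pvTokB rest
    else if pvIsOpB c then String.mk [c] :: pvTokB rest
    else String.mk (c :: rest.takeWhile pvIsNumB) :: pvTokB (rest.dropWhile pvIsNumB)
termination_by l => l.length
decreasing_by
  · simp
  · simp
  · simpa using Nat.lt_succ_of_le (List.length_dropWhile_le _ _)

def stringToInfixList_alt (inf : String) : List String :=
  pvTokB (inf.toList.filter pvKeepB)

-- ===== PRECONDITION & SPEC =====
def Spec_stringToInfixList (inf : String) (out : List String) : Prop := out = stringToInfixList_alt inf
instance (inf : String) (out : List String) : Decidable (Spec_stringToInfixList inf out) := by unfold Spec_stringToInfixList; infer_instance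

-- ===== CLAIM (what is proved, stated in full; the proofs are below) =====
def Claim_equal_stringToInfixList : Prop := ∀ (inf : String), Dom_stringToInfixList inf → Spec_stringToInfixList inf (stringToInfixList inf)

-- ===== LEMMAS AND PROOFS =====

-- pvIsNumA and pvIsNumB agree
theorem pvNumAB (c : Char) : pvIsNumA c = pvIsNumB c := by
  simp [pvIsNumA, pvIsNumB, Bool.or_comm]

theorem pvOp_not_num (c : Char) (h : pvIsOpB c = true) : pvIsNumB c = false := by
  simp [pvIsOpB] at h
  rcases h with (((((h|h)|h)|h)|h)|h)|h <;> (subst h; decide)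

theorem pvNum_not_op (c : Char) (h : pvIsNumB c = true) : pvIsOpB c = false ∧ c ≠ ' ' := by
  constructor
  · cases hop : pvIsOpB c
    · rfl
    · exact absurd (pvOp_not_num c hop) (by simp [h])
  · intro hc; subst hc; exact absurd h (by decide)

-- a maximal digit/dot run followed by a non-number character
theorem pvRun (ds : List Char) (x : Char) (rest : List Char)
    (hds : ∀ c ∈ ds, pvIsNumB c = true) (hx : pvIsNumB x = false) :
    (ds ++ x :: rest).takeWhile pvIsNumB = ds ∧
    (ds ++ x :: rest).dropWhile pvIsNumB = x :: rest := by
  induction ds with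
  | nil => simp [List.takeWhile_cons, List.dropWhile_cons, hx]
  | cons d ds ih =>
    have hd := hds d (by simp)
    have h' := ih (fun c hc => hds c (by simp [hc]))
    simp [List.takeWhile_cons, List.dropWhile_cons, hd, h'.1, h'.2]

-- A's step ignores every character B's filter drops
theorem pvStepA_drop (st : List String × List Char) (c : Char) (h : pvKeepB c = false) :
    pvStepA st c = st := by
  simp only [pvKeepB, Bool.or_eq_false_iff] at h
  obtain ⟨⟨hsp, hn⟩, ho⟩ := h
  have hsp' : c ≠ ' ' := by simpa using hsp
  have hnA : pvIsNumA c = false := by rw [pvNumAB]; exact hn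
  have hoA : pvIsOpA c = false := ho
  simp [pvStepA, hsp', hnA, hoA]

theorem pvFoldA_filter (l : List Char) (st : List String × List Char) :
    l.foldl pvStepA st = (l.filter pvKeepB).foldl pvStepA st := by
  induction l generalizing st with
  | nil => rfl
  | cons c rest ih =>
    by_cases h : pvKeepB c = true
    · simp [List.filter_cons, h, List.foldl_cons, ih]
    · have h' : pvKeepB c = false := by simpa using h
      simp [List.filter_cons, h', List.foldl_cons, pvStepA_drop st c h', ih]

-- main invariant: on a cleaned suffix l, finishing A's fold from (acc, cache)
-- yields acc ++ the B-tokens of cache ++ l, provided cache holds only number chars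
theorem pvMain (l : List Char) (acc : List String) (cache : List Char)
    (hl : ∀ c ∈ l, pvKeepB c = true) (hc : ∀ c ∈ cache, pvIsNumB c = true) :
    pvFlushA (l.foldl pvStepA (acc, cache)) = acc ++ pvTokB (cache ++ l) := by
  induction l generalizing acc cache with
  | nil =>
    cases cache with
    | nil => simp [pvFlushA, pvTokB]
    | cons d ds =>
      have hd := hc d (by simp)
      have hds : ds.takeWhile pvIsNumB = ds := by
        rw [List.takeWhile_eq_self_iff]; intro x hx; exact hc x (by simp [hx])
      have hds' : ds.dropWhile pvIsNumB = [] := by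
        rw [List.dropWhile_eq_nil_iff]; intro x hx; exact hc x (by simp [hx])
      obtain ⟨hop, hsp⟩ := pvNum_not_op d hd
      simp [pvFlushA, pvTokB, hsp, hop, hds, hds']
  | cons c rest ih =>
    have hck := hl c (by simp)
    have hrest : ∀ x ∈ rest, pvKeepB x = true := fun x hx => hl x (by simp [hx])
    by_cases hsp : c = ' '
    · subst hsp
      cases cache with
      | nil =>
        have hstep : pvStepA (acc, []) ' ' = (acc, []) := by
          simp [pvStepA, show pvIsNumA ' ' = false from by decide,
                show pvIsOpA ' ' = false from by decide]
        simp only [List.foldl_cons, hstep]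
        simpa [pvTokB] using ih acc [] hrest (by simp)
      | cons d ds =>
        have hstep : pvStepA (acc, d :: ds) ' ' = (acc ++ [String.mk (d :: ds)], []) := by
          simp [pvStepA]
        have hd := hc d (by simp)
        have hds : ∀ x ∈ ds, pvIsNumB x = true := fun x hx => hc x (by simp [hx])
        have hrun := pvRun ds ' ' rest hds (by decide)
        obtain ⟨hop, hspd⟩ := pvNum_not_op d hd
        rw [List.foldl_cons, hstep, ih _ _ hrest (by simp)]
        simp [pvTokB, hspd, hop, hrun.1, hrun.2]
    · by_cases hnum : pvIsNumB c = true
      · have hstep : pvStepA (acc, cache) c = (acc, cache ++ [c]) := by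
          simp [pvStepA, hsp, pvNumAB, hnum]
        have hc' : ∀ x ∈ cache ++ [c], pvIsNumB x = true := by
          intro x hx; rcases List.mem_append.1 hx with h | h
          · exact hc x h
          · simp at h; subst h; exact hnum
        rw [List.foldl_cons, hstep, ih _ _ hrest hc']
        simp
      · -- c is an operator
        have hnumf : pvIsNumB c = false := by simpa using hnum
        have hop : pvIsOpB c = true := by
          have h := hck; simp [pvKeepB, hsp, hnumf] at h; exact h
        have hnum' : pvIsNumA c = false := by rw [pvNumAB]; exact hnumf
        have hopA : pvIsOpA c = true := hop
        have hstep : pvStepA (acc, cache) c =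
            ((if cache ≠ [] then acc ++ [String.mk cache] else acc) ++ [String.mk [c]], []) := by
          simp [pvStepA, hsp, hnum', hopA]
        rw [List.foldl_cons, hstep, ih _ _ hrest (by simp)]
        cases cache with
        | nil => simp [pvTokB, hsp, hop]
        | cons d ds =>
          have hd := hc d (by simp)
          have hds : ∀ x ∈ ds, pvIsNumB x = true := fun x hx => hc x (by simp [hx])
          have hrun := pvRun ds c rest hds hnumf
          obtain ⟨hopd, hspd⟩ := pvNum_not_op d hd
          simp [pvTokB, hspd, hopd, hrun.1, hrun.2, hsp, hop]

-- ===== VERDICT (by name: the statement is the Claim_ definition above) =====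
theorem stringToInfixList_spec : Claim_equal_stringToInfixList := by
  intro inf _
  show stringToInfixList inf = stringToInfixList_alt inf
  unfold stringToInfixList stringToInfixList_alt
  rw [pvFoldA_filter]
  simpa using pvMain (inf.toList.filter pvKeepB) [] []
    (fun c hc => (List.mem_filter.1 hc).2) (by simp)
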